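-- pv_equiv track=rewrite | github.com/setupelz/fair-shares | src/fair_shares/library/utils/data/pipeline.py | _extract_notebook_error
-- ===== SOURCE A (Python) =====
-- def _extract_notebook_error(stderr: str) -> str | None:
--     """Extract the actual notebook error from Snakemake output."""
--     lines = stderr.split("\n")
--
--     # Find the notebook error section
--     in_error_section = False
--     error_lines = []
--
--     for line in lines:
--         if "NOTEBOOK EXECUTION FAILED" in line:
--             in_error_section = True
--             continue
--         if in_error_section:
--             if line.startswith("RuleException:") or line.startswith("["):
--                 break
--             error_lines.append(line)
--
--     if error_lines:
--         return "\n".join(error_lines).strip()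
--     return None
-- ===== SOURCE B (Python) =====
-- def _extract_notebook_error(stderr: str) -> str | None:
--     """Extract the actual notebook error from Snakemake output."""
--     marker = "NOTEBOOK EXECUTION FAILED"
--     _before, sep, after = stderr.partition(marker)
--     if not sep:
--         return None
--     # lines after the marker line, with any further marker-bearing lines removed
--     tail = [l for l in after.split("\n")[1:] if marker not in l]
--     stop = next((i for i, l in enumerate(tail)
--                  if l.startswith(("RuleException:", "["))), len(tail))
--     collected = tail[:stop]
--     return "\n".join(collected).strip() if collected else None
-- ===== Notes on version B (the rewrite author's own statement) =====
-- stated objective: idiomatic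
-- what changed: Replaces A's line-by-line scan with an in_error_section boolean flag by str.partition on the marker in the raw string followed by a staged pipeline: slice off the marker line, filter out further marker-bearing lines, cut the list at the first terminator index found with next()/enumerate, then join.
import Mathlib
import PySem

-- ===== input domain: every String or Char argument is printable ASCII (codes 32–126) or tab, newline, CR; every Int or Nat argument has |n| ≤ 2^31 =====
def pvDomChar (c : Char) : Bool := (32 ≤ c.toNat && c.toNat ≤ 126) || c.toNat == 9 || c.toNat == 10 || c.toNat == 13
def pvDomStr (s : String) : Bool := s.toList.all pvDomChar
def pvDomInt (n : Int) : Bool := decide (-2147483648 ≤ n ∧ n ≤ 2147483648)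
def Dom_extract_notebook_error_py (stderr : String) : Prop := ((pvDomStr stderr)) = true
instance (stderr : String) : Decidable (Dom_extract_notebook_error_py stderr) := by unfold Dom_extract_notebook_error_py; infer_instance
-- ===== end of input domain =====

-- B replaces A's line-by-line flag loop by str.partition on the marker in the RAW string, then a
-- staged pipeline (slice off the marker line, filter further marker lines, cut at the first
-- terminator index) over the remainder's lines; objective: idiomatic, same cost.

-- the marker / terminator tests, shared verbatim by both Pythons
def pvMarkerL : List Char := "NOTEBOOK EXECUTION FAILED".toList
def pvBadLine (l : List Char) : Bool :=
  PySem.Chars.startswith l "RuleException:".toList || PySem.Chars.startswith l "[".toList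

-- ===== PORT A =====
-- A's for-loop with the in_error_section flag and break, as structural recursion over the lines
-- (break = stop and return the accumulator).
def pvLoopA : List (List Char) → Bool → List (List Char) → List (List Char)
  | [], _, acc => acc
  | l :: ls, flag, acc =>
    if PySem.Chars.isIn pvMarkerL l then pvLoopA ls true acc
    else if flag then
      if pvBadLine l then acc
      else pvLoopA ls flag (acc ++ [l])
    else pvLoopA ls flag acc

def extract_notebook_error_py (stderr : String) : Option String :=
  let lines := (PySem.Chars.split? stderr.toList "\n".toList).getD []   -- sep ≠ "", so split? is `some`
  let error_lines := pvLoopA lines false []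
  if error_lines ≠ [] then
    some (String.ofList (PySem.Chars.strip (PySem.Chars.join "\n".toList error_lines)))
  else none

-- ===== PORT B =====
def extract_notebook_error_py_alt (stderr : String) : Option String :=
  -- str.partition(marker), ported by hand (exact): sep == "" iff find == -1, and `after`
  -- (the only part B uses) is the text beyond the first occurrence of the marker
  let i := PySem.Chars.find stderr.toList pvMarkerL
  if i = -1 then none
  else
    let after := stderr.toList.drop (i.toNat + pvMarkerL.length)   -- i ≥ 0 here, so toNat is exact
    -- after.split("\n")[1:], then the comprehension's filter
    let tail := (((PySem.Chars.split? after "\n".toList).getD []).drop 1).filter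
        (fun l => !(PySem.Chars.isIn pvMarkerL l))
    -- next((i for i, l in enumerate(tail) if l.startswith(...)), len(tail)) = first such index, else length
    let stop := tail.findIdx pvBadLine
    let collected := tail.take stop
    if collected ≠ [] then
      some (String.ofList (PySem.Chars.strip (PySem.Chars.join "\n".toList collected)))
    else none

-- ===== PRECONDITION & SPEC =====
def Spec_extract_notebook_error_py (stderr : String) (out : Option String) : Prop :=
  out = extract_notebook_error_py_alt stderr
instance (stderr : String) (out : Option String) : Decidable (Spec_extract_notebook_error_py stderr out) := by
  unfold Spec_extract_notebook_error_py; infer_instance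

-- ===== CLAIM (what is proved, stated in full; the proofs are below) =====
def Claim_equal_extract_notebook_error_py : Prop :=
  ∀ (stderr : String), Dom_extract_notebook_error_py stderr →
    Spec_extract_notebook_error_py stderr (extract_notebook_error_py stderr)

-- ===== LEMMAS AND PROOFS =====

-- first index of a line containing the marker (proof-side characterisation of A's flag phase)
def pvFindMarker : List (List Char) → Option Nat
  | [] => none
  | l :: ls => if PySem.Chars.isIn pvMarkerL l then some 0 else (pvFindMarker ls).map (· + 1)

-- A's collection phase once the flag is set
def pvCollectB : List (List Char) → List (List Char) → List (List Char)
  | [], acc => acc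
  | l :: ls, acc =>
    if PySem.Chars.isIn pvMarkerL l then pvCollectB ls acc
    else if pvBadLine l then acc
    else pvCollectB ls (acc ++ [l])

-- structural model of splitting on '\n'
def pvSpl : List Char → List (List Char)
  | [] => [[]]
  | c :: rest => if c = '\n' then [] :: pvSpl rest else (pvSpl rest).modifyHead (c :: ·)

theorem pvSpl_ne_nil (s : List Char) : pvSpl s ≠ [] := by
  induction s with
  | nil => simp [pvSpl]
  | cons c rest ih =>
    simp only [pvSpl]
    split_ifs
    · simp
    · cases h : pvSpl rest with
      | nil => exact absurd h ih
      | cons a t => simp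

theorem pvGo_eq (fuel : Nat) : ∀ (l cur : List Char) (acc : List (List Char)), l.length ≤ fuel →
    PySem.Chars.splitOn.go ['\n'] fuel l cur acc
      = acc.reverse ++ (pvSpl l).modifyHead (cur.reverse ++ ·) := by
  induction fuel with
  | zero =>
    intro l cur acc h
    have : l = [] := by simpa using List.eq_nil_of_length_eq_zero (Nat.le_zero.mp h)
    subst this
    simp [PySem.Chars.splitOn.go, pvSpl]
  | succ f ih =>
    intro l cur acc h
    cases l with
    | nil => simp [PySem.Chars.splitOn.go, pvSpl]
    | cons c rest =>
      simp only [PySem.Chars.splitOn.go]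
      by_cases hc : c = '\n'
      · subst hc
        rw [if_pos (by simp [List.isPrefixOf])]
        rw [ih _ _ _ (by simpa using Nat.le_of_succ_le_succ h)]
        obtain ⟨hd, tl, hsp⟩ : ∃ hd tl, pvSpl rest = hd :: tl := by
          cases hq : pvSpl rest with
          | nil => exact absurd hq (pvSpl_ne_nil rest)
          | cons x y => exact ⟨x, y, rfl⟩
        simp [pvSpl, hsp]
      · rw [if_neg (by simp [List.isPrefixOf]; exact fun hh => hc hh.symm)]
        rw [ih _ _ _ (by simpa using Nat.le_of_succ_le_succ h)]
        obtain ⟨a, t, ht⟩ : ∃ a t, pvSpl rest = a :: t := by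
          cases hsp : pvSpl rest with
          | nil => exact absurd hsp (pvSpl_ne_nil rest)
          | cons a t => exact ⟨a, t, rfl⟩
        simp [pvSpl, hc, ht]

theorem pvSplitOn_eq (s : List Char) : PySem.Chars.splitOn s ['\n'] = pvSpl s := by
  unfold PySem.Chars.splitOn
  rw [pvGo_eq (s.length + 1) s [] [] (by omega)]
  obtain ⟨a, t, ht⟩ : ∃ a t, pvSpl s = a :: t := by
    cases hsp : pvSpl s with
    | nil => exact absurd hsp (pvSpl_ne_nil s)
    | cons a t => exact ⟨a, t, rfl⟩
  simp [ht]

theorem pvSpl_no_nl (s : List Char) (h : '\n' ∉ s) : pvSpl s = [s] := by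
  induction s with
  | nil => rfl
  | cons c rest ih =>
    simp only [pvSpl]
    simp only [not_or, List.mem_cons] at h
    rw [if_neg (fun hc => h.1 hc.symm)]
    rw [ih h.2]
    rfl

theorem pvSpl_append (a b : List Char) (h : '\n' ∉ a) :
    pvSpl (a ++ '\n' :: b) = a :: pvSpl b := by
  induction a with
  | nil => simp [pvSpl]
  | cons c rest ih =>
    simp only [List.cons_append, pvSpl]
    simp only [not_or, List.mem_cons] at h
    rw [if_neg (fun hc => h.1 hc.symm), ih h.2]
    rfl

-- first-occurrence characterisation of find
theorem pvFind_eq_of (s sub : List Char) (n : Nat)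
    (h1 : sub <+: s.drop n) (h2 : ∀ j < n, ¬ sub <+: s.drop j) :
    PySem.Chars.find s sub = (n : Int) := by
  have hin : PySem.Chars.isIn sub s = true :=
    (PySem.Chars.exists_prefix_drop_iff_isIn sub s).mp ⟨n, h1⟩
  have hpos : 0 ≤ PySem.Chars.find s sub :=
    (PySem.Chars.find_nonneg_iff s sub).mpr ((PySem.Chars.isIn_iff_infix sub s).mp hin)
  obtain ⟨hp, hmin⟩ := PySem.Chars.find_spec hpos
  have : (PySem.Chars.find s sub).toNat = n := by
    rcases Nat.lt_trichotomy (PySem.Chars.find s sub).toNat n with h | h | h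
    · exact absurd hp (h2 _ h)
    · exact h
    · exact absurd h1 (hmin n h)
  omega

-- an occurrence of the ('\n'-free) marker in a ++ '\n' :: b lies inside a or inside b
theorem pvSplitOcc (a b sub : List Char) (hnl : '\n' ∉ sub) (i : Nat)
    (h : sub <+: (a ++ '\n' :: b).drop i) :
    i + sub.length ≤ a.length ∨ a.length + 1 ≤ i := by
  by_contra hcon
  push_neg at hcon
  obtain ⟨h1, h2⟩ := hcon
  -- i ≤ a.length < i + sub.length : position a.length of s is '\n' and falls inside sub
  obtain ⟨t, ht⟩ := h
  have hi : i ≤ a.length := by omega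
  have hlt : a.length - i < sub.length := by omega
  have hsl : a.length - i < (sub ++ t).length := by simp; omega
  have hsd : a.length - i < ((a ++ '\n' :: b).drop i).length := by simp; omega
  have hnlv : ((a ++ '\n' :: b).drop i)[a.length - i]'hsd = '\n' := by
    rw [List.getElem_drop]
    have hia : i + (a.length - i) = a.length := by omega
    simp only [hia]
    rw [List.getElem_append_right (le_refl a.length)]
    simp
  have e2 : sub[a.length - i]'hlt = (sub ++ t)[a.length - i]'hsl := by
    rw [List.getElem_append_left hlt]
  have e3 : (sub ++ t)[a.length - i]'hsl = ((a ++ '\n' :: b).drop i)[a.length - i]'hsd :=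
    List.getElem_of_eq ht _
  have hval : sub[a.length - i]'hlt = '\n' := by rw [e2, e3, hnlv]
  exact hnl (hval ▸ List.getElem_mem hlt)

theorem pvPrefix_append_left {x y sub : List Char} (h : sub <+: x ++ y)
    (hl : sub.length ≤ x.length) : sub <+: x := by
  have := List.prefix_take_iff.mpr ⟨h, le_refl _⟩
  rw [List.take_append_of_le_length hl] at this
  exact this.trans (List.take_prefix _ _)

theorem pvDropPast (a b : List Char) (k : Nat) :
    (a ++ '\n' :: b).drop (a.length + 1 + k) = b.drop k := by
  induction a with
  | nil =>
    have h1 : (List.nil (α := Char)).length + 1 + k = k + 1 := by simp only [List.length_nil]; omega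
    simp only [List.nil_append, h1, List.drop_succ_cons]
  | cons c rest ih =>
    have hl : (c :: rest).length + 1 + k = (rest.length + 1 + k) + 1 := by
      simp only [List.length_cons]; omega
    simp only [List.cons_append, hl, List.drop_succ_cons]
    exact ih

theorem pvDecomp (s : List Char) (hmem : '\n' ∈ s) :
    ∃ a b, s = a ++ '\n' :: b ∧ '\n' ∉ a := by
  have hd : s.dropWhile (fun c => c != '\n') ≠ [] := by
    intro h
    have := (List.dropWhile_eq_nil_iff).mp h '\n' hmem
    simp at this
  refine ⟨s.takeWhile (fun c => c != '\n'), (s.dropWhile (fun c => c != '\n')).tail, ?_, ?_⟩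
  · have hh := List.head_dropWhile_not (fun c => c != '\n') hd
    have hhead : (s.dropWhile (fun c => c != '\n')).head hd = '\n' := by simpa using hh
    conv_lhs => rw [← List.takeWhile_append_dropWhile (p := fun c => c != '\n') (l := s)]
    rw [← List.cons_head_tail hd, hhead]
    simp
  · intro hc
    have := List.mem_takeWhile_imp hc
    simp at this

theorem pvMarker_no_nl : '\n' ∉ pvMarkerL := by decide

-- the MAIN lemma: find on the raw string vs the first marker line of the split
theorem pvMain : ∀ (n : Nat) (s : List Char), s.length = n →
    (match pvFindMarker (pvSpl s) with
     | none => PySem.Chars.find s pvMarkerL = -1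
     | some k =>
        0 ≤ PySem.Chars.find s pvMarkerL ∧
        (pvSpl (s.drop ((PySem.Chars.find s pvMarkerL).toNat + pvMarkerL.length))).drop 1
          = (pvSpl s).drop (k + 1)) := by
  intro n
  induction n using Nat.strong_induction_on with
  | _ n ih =>
    intro s hs
    by_cases hmem : '\n' ∈ s
    · -- s = a ++ '\n' :: b with '\n' ∉ a
      obtain ⟨a, b, hsab, hna⟩ := pvDecomp s hmem
      subst hsab
      rw [pvSpl_append a b hna]
      have hM0 : 0 < pvMarkerL.length := by decide
      by_cases hina : PySem.Chars.isIn pvMarkerL a = true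
      · rw [show pvFindMarker (a :: pvSpl b) = some 0 from by simp [pvFindMarker, hina]]
        have hposA : 0 ≤ PySem.Chars.find a pvMarkerL :=
          (PySem.Chars.find_nonneg_iff a pvMarkerL).mpr ((PySem.Chars.isIn_iff_infix _ _).mp hina)
        obtain ⟨hpA, hminA⟩ := PySem.Chars.find_spec hposA
        have hlen := hpA.length_le
        rw [List.length_drop] at hlen
        have hjle : (PySem.Chars.find a pvMarkerL).toNat + pvMarkerL.length ≤ a.length := by omega
        have hfind : PySem.Chars.find (a ++ '\n' :: b) pvMarkerL
            = ((PySem.Chars.find a pvMarkerL).toNat : Int) := by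
          apply pvFind_eq_of _ _ _
          · rw [List.drop_append_of_le_length (by omega)]
            exact hpA.trans (List.prefix_append _ _)
          · intro i hij hcon
            rcases pvSplitOcc a b pvMarkerL pvMarker_no_nl i hcon with h1 | h2
            · rw [List.drop_append_of_le_length (by omega)] at hcon
              exact hminA i hij (pvPrefix_append_left hcon (by rw [List.length_drop]; omega))
            · omega
        refine ⟨by rw [hfind]; exact Int.natCast_nonneg _, ?_⟩
        rw [hfind, Int.toNat_natCast, List.drop_append_of_le_length hjle]
        rw [pvSpl_append _ b (fun hc => hna (List.mem_of_mem_drop hc))]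
        simp
      · rw [show pvFindMarker (a :: pvSpl b) = (pvFindMarker (pvSpl b)).map (· + 1) from by
          simp [pvFindMarker, hina]]
        have hblt : b.length < n := by
          rw [← hs]; simp only [List.length_append, List.length_cons]; omega
        have IH := ih b.length hblt b rfl
        cases hfb : pvFindMarker (pvSpl b) with
        | none =>
          rw [hfb] at IH
          simp only at IH
          simp only [Option.map_none]
          apply (PySem.Chars.find_eq_neg_one_iff _ _).mpr
          intro hinf
          obtain ⟨i, hp⟩ := (PySem.Chars.exists_prefix_drop_iff_isIn _ _).mpr
            ((PySem.Chars.isIn_iff_infix _ _).mpr hinf)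
          rcases pvSplitOcc a b pvMarkerL pvMarker_no_nl i hp with h1 | h2
          · rw [List.drop_append_of_le_length (by omega)] at hp
            have hpa := pvPrefix_append_left hp (by rw [List.length_drop]; omega)
            exact hina ((PySem.Chars.exists_prefix_drop_iff_isIn _ _).mp ⟨i, hpa⟩)
          · rw [show i = a.length + 1 + (i - (a.length + 1)) from by omega] at hp
            rw [pvDropPast] at hp
            have hbin := (PySem.Chars.exists_prefix_drop_iff_isIn _ _).mp ⟨_, hp⟩
            have hbeq := (PySem.Chars.find_eq_neg_one_iff b pvMarkerL).mp IH
            exact hbeq ((PySem.Chars.isIn_iff_infix _ _).mp hbin)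
        | some kb =>
          rw [hfb] at IH
          simp only at IH
          obtain ⟨hposb, hsplb⟩ := IH
          obtain ⟨hpB, hminB⟩ := PySem.Chars.find_spec hposb
          simp only [Option.map_some]
          have hfind : PySem.Chars.find (a ++ '\n' :: b) pvMarkerL
              = ((a.length + 1 + (PySem.Chars.find b pvMarkerL).toNat : Nat) : Int) := by
            apply pvFind_eq_of _ _ _
            · rw [pvDropPast]; exact hpB
            · intro i hij hcon
              rcases pvSplitOcc a b pvMarkerL pvMarker_no_nl i hcon with h1 | h2
              · rw [List.drop_append_of_le_length (by omega)] at hcon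
                have hpa := pvPrefix_append_left hcon (by rw [List.length_drop]; omega)
                exact hina ((PySem.Chars.exists_prefix_drop_iff_isIn _ _).mp ⟨i, hpa⟩)
              · rw [show i = a.length + 1 + (i - (a.length + 1)) from by omega] at hcon
                rw [pvDropPast] at hcon
                exact hminB _ (by omega) hcon
          refine ⟨by rw [hfind]; exact Int.natCast_nonneg _, ?_⟩
          rw [hfind, Int.toNat_natCast]
          rw [show a.length + 1 + (PySem.Chars.find b pvMarkerL).toNat + pvMarkerL.length
              = a.length + 1 + ((PySem.Chars.find b pvMarkerL).toNat + pvMarkerL.length) from by omega]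
          rw [pvDropPast, hsplb]
          simp
    · -- single line
      rw [pvSpl_no_nl s hmem]
      by_cases hin : PySem.Chars.isIn pvMarkerL s = true
      · rw [show pvFindMarker [s] = some 0 from by simp [pvFindMarker, hin]]
        have hpos : 0 ≤ PySem.Chars.find s pvMarkerL :=
          (PySem.Chars.find_nonneg_iff s pvMarkerL).mpr ((PySem.Chars.isIn_iff_infix _ s).mp hin)
        refine ⟨hpos, ?_⟩
        have hnl2 : '\n' ∉ s.drop ((PySem.Chars.find s pvMarkerL).toNat + pvMarkerL.length) :=
          fun hc => hmem (List.mem_of_mem_drop hc)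
        rw [pvSpl_no_nl _ hnl2]
        simp
      · rw [show pvFindMarker [s] = none from by simp [pvFindMarker, hin]]
        exact (PySem.Chars.find_eq_neg_one_iff s pvMarkerL).mpr
          (fun hc => hin ((PySem.Chars.isIn_iff_infix _ s).mpr hc))

-- once the flag is set, A's loop is exactly its collection phase
theorem pvLoopA_true (ls : List (List Char)) (acc : List (List Char)) :
    pvLoopA ls true acc = pvCollectB ls acc := by
  induction ls generalizing acc with
  | nil => rfl
  | cons l ls ih =>
    simp only [pvLoopA, pvCollectB]
    split_ifs <;> simp [ih]

-- A's whole scan = find the first marker line, then collect what follows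
theorem pvLoopA_false (ls : List (List Char)) (acc : List (List Char)) :
    pvLoopA ls false acc =
      match pvFindMarker ls with
      | none => acc
      | some k => pvCollectB (ls.drop (k + 1)) acc := by
  induction ls generalizing acc with
  | nil => rfl
  | cons l ls ih =>
    simp only [pvLoopA, pvFindMarker]
    by_cases h : PySem.Chars.isIn pvMarkerL l = true
    · rw [if_pos h, if_pos h]
      exact pvLoopA_true ls acc
    · rw [if_neg h, if_neg h]
      simp only [Bool.false_eq_true, if_false, ih]
      cases hk : pvFindMarker ls <;> simp

-- A's collection phase = B's filter / findIdx / take pipeline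
theorem pvCollectB_eq (ls : List (List Char)) (acc : List (List Char)) :
    pvCollectB ls acc =
      acc ++ ((ls.filter (fun l => !(PySem.Chars.isIn pvMarkerL l))).take
        ((ls.filter (fun l => !(PySem.Chars.isIn pvMarkerL l))).findIdx pvBadLine)) := by
  induction ls generalizing acc with
  | nil => simp [pvCollectB]
  | cons l ls ih =>
    simp only [pvCollectB, List.filter_cons]
    by_cases h1 : PySem.Chars.isIn pvMarkerL l = true
    · rw [if_pos h1]
      simp only [h1, Bool.not_true, Bool.false_eq_true, if_false]
      exact ih acc
    · rw [if_neg h1]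
      have hfl : (!PySem.Chars.isIn pvMarkerL l) = true := by simp [h1]
      rw [if_pos hfl]
      by_cases h2 : pvBadLine l = true
      · rw [if_pos h2, List.findIdx_cons, h2]
        simp
      · rw [if_neg h2, List.findIdx_cons]
        simp only [h2, cond_false]
        rw [List.take_succ_cons, ih (acc ++ [l])]
        simp

-- ===== VERDICT =====
theorem extract_notebook_error_py_spec : Claim_equal_extract_notebook_error_py := by
  intro stderr _
  unfold Spec_extract_notebook_error_py extract_notebook_error_py extract_notebook_error_py_alt
  have hnl : ("\n".toList : List Char) = ['\n'] := rfl
  have hsplit : ∀ t : List Char, PySem.Chars.split? t ['\n'] = some (pvSpl t) := by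
    intro t
    simp [PySem.Chars.split?, pvSplitOn_eq]
  simp only [hnl, hsplit, Option.getD_some]
  rw [pvLoopA_false]
  have H := pvMain stderr.toList.length stderr.toList rfl
  cases hfm : pvFindMarker (pvSpl stderr.toList) with
  | none =>
    rw [hfm] at H
    simp only at H
    simp [H]
  | some k =>
    rw [hfm] at H
    simp only at H
    obtain ⟨hpos, hdrop⟩ := H
    rw [if_neg (by omega : ¬ PySem.Chars.find stderr.toList pvMarkerL = -1)]
    simp only [hdrop]
    simp only [pvCollectB_eq]
    simp
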